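-- pv_equiv track=rewrite | github.com/zaidmuslim0647/f23-0647-NLP-Assignment2 | src/utils/annotation.py | tag_ner_bio
-- ===== SOURCE A (Python) =====
-- def tag_ner_bio(tokens: list[str], phrase_map: dict[tuple[str, ...], str]) -> list[str]:
--     lower_tokens = [t.lower() for t in tokens]
--     tags = ["O"] * len(tokens)
--
--     max_len = max((len(k) for k in phrase_map.keys()), default=1)
--     i = 0
--     while i < len(tokens):
--         matched = False
--         for length in range(min(max_len, len(tokens) - i), 0, -1):
--             span = tuple(lower_tokens[i : i + length])
--             ent_type = phrase_map.get(span)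
--             if ent_type is None:
--                 continue
--
--             tags[i] = f"B-{ent_type}"
--             for j in range(i + 1, i + length):
--                 tags[j] = f"I-{ent_type}"
--             i += length
--             matched = True
--             break
--
--         if not matched:
--             i += 1
--
--     return tags
-- ===== SOURCE B (Python) =====
-- def tag_ner_bio(tokens: list[str], phrase_map: dict[tuple[str, ...], str]) -> list[str]:
--     lower = [t.lower() for t in tokens]
--     # Set of all proper prefixes of the phrases: lets the forward walk below stop
--     # as soon as no phrase can extend the current span.
--     pref = set()
--     for phrase in phrase_map:
--         for j in range(1, len(phrase)):
--             pref.add(phrase[:j])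
--     n = len(tokens)
--     out = []
--     i = 0
--     while i < n:
--         span = ()
--         best_len = 0
--         best_ent = None
--         j = i
--         while j < n:
--             span = span + (lower[j],)
--             j += 1
--             ent = phrase_map.get(span)
--             if ent is not None:
--                 best_len, best_ent = j - i, ent
--             if span not in pref:
--                 break
--         if best_ent is None:
--             out.append("O")
--             i += 1
--         else:
--             out.append("B-" + best_ent)
--             out.extend(["I-" + best_ent] * (best_len - 1))
--             i += best_len
--     return out
-- ===== Notes on version B (the rewrite author's own statement) =====
-- stated objective: alternative
-- what changed: A probes the dict with a freshly built span tuple for every length from max_len down to 1 at every position and writes tags into a preset array; B precomputes the set of proper phrase prefixes and does a forward token-by-token walk per position, pruned by that set, tracking the longest terminal match, and emits each B-/I- run by appending to the output.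
import Mathlib
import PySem

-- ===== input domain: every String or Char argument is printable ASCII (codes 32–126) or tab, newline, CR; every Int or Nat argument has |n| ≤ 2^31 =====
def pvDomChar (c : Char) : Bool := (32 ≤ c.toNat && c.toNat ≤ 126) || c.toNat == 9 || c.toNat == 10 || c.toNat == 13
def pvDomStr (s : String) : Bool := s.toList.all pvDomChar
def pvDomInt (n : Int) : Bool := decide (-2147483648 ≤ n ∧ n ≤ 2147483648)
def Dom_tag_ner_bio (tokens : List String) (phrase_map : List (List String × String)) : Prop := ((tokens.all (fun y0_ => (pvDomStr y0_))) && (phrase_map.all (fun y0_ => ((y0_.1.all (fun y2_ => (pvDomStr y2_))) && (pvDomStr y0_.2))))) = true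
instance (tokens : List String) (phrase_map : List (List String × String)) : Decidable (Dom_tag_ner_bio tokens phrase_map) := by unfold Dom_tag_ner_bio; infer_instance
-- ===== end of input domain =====

-- B replaces A's per-position descending-length dict probes by a forward walk that extends
-- the span token by token, pruned by a precomputed set of proper phrase prefixes, tracking the
-- longest terminal match, and emits each B-/I- run directly (objective: alternative).

-- ===== PORT A =====
-- inner 'for length in range(..., 0, -1)' with 'continue'/'break': first length whose span is a key
def tagA_first (pm : PySem.Dict (List String) String) (lower : List String) (i : Nat) :
    List Int → Option (Int × String)
  | [] => none
  | L :: rest =>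
    match pm.get? (PySem.List.slice lower (some (i : Int)) (some ((i : Int) + L))) with
    | some e => some (L, e)
    | none => tagA_first pm lower i rest

-- the 'while i < len(tokens)' loop; i strictly increases each pass, so fuel = len(tokens) suffices
def tagA_loop (pm : PySem.Dict (List String) String) (lower : List String) (n maxLen : Nat) :
    Nat → Nat → List String → List String
  | 0, _, tags => tags
  | fuel+1, i, tags =>
    if i < n then
      match tagA_first pm lower i
          (PySem.List.pyRange (min (maxLen : Int) ((n : Int) - (i : Int))) 0 (-1)) with
      | some (L, e) =>
        let tags1 := PySem.List.pySetD tags (i : Int) ("B-" ++ e)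
        let tags2 := (PySem.List.pyRange ((i : Int) + 1) ((i : Int) + L) 1).foldl
            (fun t j => PySem.List.pySetD t j ("I-" ++ e)) tags1
        tagA_loop pm lower n maxLen fuel (i + L.toNat) tags2
      | none => tagA_loop pm lower n maxLen fuel (i + 1) tags
    else tags

def tag_ner_bio (tokens : List String) (phrase_map : List (List String × String)) : List String :=
  let lower_tokens := tokens.map PySem.Str.lower
  let tags := List.replicate tokens.length "O"
  let max_len := PySem.List.maxD (phrase_map.map (fun kv => kv.1.length)) (fun x => x) 1
  tagA_loop (PySem.Dict.mk phrase_map) lower_tokens tokens.length max_len tokens.length 0 tags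

-- ===== PORT B =====
-- pref = { phrase[:j] | phrase a key, 1 <= j < len(phrase) } : all proper prefixes
def tagB_pref (pm : List (List String × String)) : PySem.Set (List String) :=
  pm.foldl (fun s pe =>
    (PySem.List.pyRange 1 (pe.1.length : Int) 1).foldl
      (fun s j => PySem.Set.add s (PySem.List.slice pe.1 none (some j))) s) []

-- the inner 'while j < n' walk: extend span, record dict hits, break when span leaves pref
def tagB_walk (pm : PySem.Dict (List String) String) (pref : PySem.Set (List String))
    (lower : List String) (n i : Nat) : Nat → Nat → List String → (Nat × Option String) →
    Nat × Option String
  | 0, _, _, best => best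
  | fuel+1, j, span, best =>
    if j < n then
      let span' := span ++ [PySem.List.pyGetD lower (j : Int) ""]
      let best' := match pm.get? span' with
        | some e => (j + 1 - i, some e)
        | none => best
      if PySem.Set.contains pref span' then tagB_walk pm pref lower n i fuel (j+1) span' best'
      else best'
    else best

-- the outer 'while i < n' loop appending to out; i strictly increases each pass, so fuel = n suffices
def tagB_go (pm : PySem.Dict (List String) String) (pref : PySem.Set (List String))
    (lower : List String) (n : Nat) : Nat → Nat → List String → List String
  | 0, _, out => out
  | fuel+1, i, out =>
    if i < n then
      let best := tagB_walk pm pref lower n i (n - i) i [] (0, none)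
      match best.2 with
      | none => tagB_go pm pref lower n fuel (i + 1) (out ++ ["O"])
      | some e => tagB_go pm pref lower n fuel (i + best.1)
          (out ++ ("B-" ++ e) :: List.replicate (best.1 - 1) ("I-" ++ e))
    else out

def tag_ner_bio_alt (tokens : List String) (phrase_map : List (List String × String)) : List String :=
  let lower := tokens.map PySem.Str.lower
  tagB_go (PySem.Dict.mk phrase_map) (tagB_pref phrase_map) lower tokens.length tokens.length 0 []

-- ===== PRECONDITION & SPEC =====
def Spec_tag_ner_bio (tokens : List String) (phrase_map : List (List String × String)) (out : List String) : Prop := out = tag_ner_bio_alt tokens phrase_map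
instance (tokens : List String) (phrase_map : List (List String × String)) (out : List String) : Decidable (Spec_tag_ner_bio tokens phrase_map out) := by unfold Spec_tag_ner_bio; infer_instance

-- ===== CLAIM (what is proved, stated in full; the proofs are below) =====
def Claim_equal_tag_ner_bio : Prop := ∀ (tokens : List String) (phrase_map : List (List String × String)), Dom_tag_ner_bio tokens phrase_map → Spec_tag_ner_bio tokens phrase_map (tag_ner_bio tokens phrase_map)

-- ===== LEMMAS AND PROOFS =====

-- B's scan step, named for the proofs
def stepB (lower : List String) (i : Nat) (best : Nat × Option String)
    (pe : List String × String) : Nat × Option String :=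
  if best.1 < pe.1.length ∧
      PySem.List.slice lower (some (i : Int)) (some ((i : Int) + (pe.1.length : Int))) = pe.1
  then (pe.1.length, some pe.2) else best

-- "phrase pe matches the lowered tokens at position i"
def Mtch (lower : List String) (i : Nat) (pe : List String × String) : Prop :=
  pe.1 ≠ [] ∧
    PySem.List.slice lower (some (i : Int)) (some ((i : Int) + (pe.1.length : Int))) = pe.1

theorem span_len {lower : List String} {i m : Nat} (h : i + m ≤ lower.length) :
    (PySem.List.slice lower (some (i : Int)) (some ((i : Int) + (m : Int)))).length = m := by
  rw [show ((i:Int) + (m:Int)) = (((i+m : Nat)) : Int) by push_cast; ring]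
  rw [PySem.List.slice_natCast]
  simp
  omega

theorem mtch_len_le {lower : List String} {i : Nat} {pe : List String × String}
    (hi : i ≤ lower.length) (h : Mtch lower i pe) : i + pe.1.length ≤ lower.length := by
  have hl := congrArg List.length h.2
  rw [show ((i:Int) + (pe.1.length:Int)) = (((i+pe.1.length : Nat)) : Int) by push_cast; ring,
    PySem.List.slice_natCast] at hl
  simp at hl
  omega

theorem foldl_stepB_const {lower : List String} {i m : Nat} {l : List (List String × String)}
    (h : ∀ pe ∈ l, Mtch lower i pe → pe.1.length ≤ m) :
    ∀ b : Nat × Option String, m ≤ b.1 → l.foldl (stepB lower i) b = b := by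
  induction l with
  | nil => intro b _; rfl
  | cons pe rest ih =>
    intro b hb
    have hstep : stepB lower i b pe = b := by
      unfold stepB
      rw [if_neg]
      rintro ⟨h1, h2⟩
      have hm : Mtch lower i pe := ⟨by intro hnil; rw [hnil] at h1; simp at h1, h2⟩
      exact absurd (h pe (List.mem_cons_self) hm) (by omega)
    simp only [List.foldl_cons, hstep]
    exact ih (fun q hq => h q (List.mem_cons_of_mem _ hq)) b hb

theorem get?_mk_none {pm : List (List String × String)} {key : List String}
    (h : (PySem.Dict.mk pm).get? key = none) : ∀ pe ∈ pm, pe.1 ≠ key := by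
  induction pm with
  | nil => intro pe hpe; simp at hpe
  | cons q rest ih =>
    intro pe hpe
    rw [show (PySem.Dict.mk (q :: rest)) = ({ items := (q.1, q.2) :: rest } : PySem.Dict (List String) String) by rfl] at h
    rw [PySem.Dict.get?_mk_cons] at h
    split at h
    · exact absurd h (by simp)
    · rename_i hne
      rcases List.mem_cons.mp hpe with rfl | hpe'
      · intro hk; exact hne (by simp [hk])
      · exact ih h pe hpe'

theorem foldl_stepB_hit {lower : List String} {i m : Nat} {e : String}
    {pm : List (List String × String)}
    (h1 : ∀ pe ∈ pm, Mtch lower i pe → pe.1.length ≤ m)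
    (h3 : i + m ≤ lower.length)
    (h4 : (PySem.Dict.mk pm).get?
      (PySem.List.slice lower (some (i : Int)) (some ((i : Int) + (m : Int)))) = some e) :
    ∀ b : Nat × Option String, b.1 < m → pm.foldl (stepB lower i) b = (m, some e) := by
  have hspanlen := span_len h3
  revert h1 h4
  induction pm with
  | nil =>
    intro _ h4 b _
    exact absurd h4 (by simp [PySem.Dict.get?])
  | cons q rest ih =>
    intro h1 h4 b hb
    rw [show (PySem.Dict.mk (q :: rest)) = ({ items := (q.1, q.2) :: rest } : PySem.Dict (List String) String) by rfl,
      PySem.Dict.get?_mk_cons] at h4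
    by_cases hq : q.1 = PySem.List.slice lower (some (i : Int)) (some ((i : Int) + (m : Int)))
    · rw [if_pos (by simp [hq])] at h4
      have he : e = q.2 := by simpa using h4.symm
      have hqlen : q.1.length = m := by rw [hq]; exact hspanlen
      have hstep : stepB lower i b q = (m, some e) := by
        unfold stepB
        rw [if_pos ⟨by omega, by rw [hqlen, ← hq]⟩, hqlen, he]
      simp only [List.foldl_cons, hstep]
      exact foldl_stepB_const (fun p hp hm => h1 p (List.mem_cons_of_mem _ hp) hm) _ (le_refl m)
    · rw [if_neg (by simpa using hq)] at h4
      have hlt : (stepB lower i b q).1 < m := by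
        unfold stepB
        split
        · rename_i hcond
          obtain ⟨hc1, hc2⟩ := hcond
          have hmq : Mtch lower i q := ⟨by intro hnil; rw [hnil] at hc1; simp at hc1, hc2⟩
          have hle : q.1.length ≤ m := h1 q (List.mem_cons_self) hmq
          have hne : q.1.length ≠ m := by
            intro hEq
            exact hq (by rw [← hc2, hEq])
          simpa using by omega
        · exact hb
      simp only [List.foldl_cons]
      exact ih (fun p hp hm => h1 p (List.mem_cons_of_mem _ hp) hm) h4 _ hlt

theorem scan_eq {pm : List (List String × String)} {lower : List String} {i : Nat} :
    ∀ (k : Nat), (∀ pe ∈ pm, Mtch lower i pe → pe.1.length ≤ k) → i + k ≤ lower.length →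
    match tagA_first (PySem.Dict.mk pm) lower i (PySem.List.pyRange (k : Int) 0 (-1)) with
    | none => pm.foldl (stepB lower i) (0, none) = (0, none)
    | some (L, e) => 1 ≤ L ∧ L ≤ (k : Int) ∧
        pm.foldl (stepB lower i) (0, none) = (L.toNat, some e) := by
  intro k
  induction k with
  | zero =>
    intro h0 hk
    rw [show ((0:Nat):Int) = (0:Int) by simp, PySem.List.pyRange_neg_one_eq_nil (le_refl 0)]
    show pm.foldl (stepB lower i) (0, none) = (0, none)
    exact foldl_stepB_const h0 _ (le_refl 0)
  | succ k ih =>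
    intro h1 hk
    rw [PySem.List.pyRange_neg_one_cons (by exact_mod_cast Nat.succ_pos k)]
    rw [show ((k+1:Nat):Int) - 1 = ((k:Nat):Int) by push_cast; ring]
    simp only [tagA_first]
    rcases hg : (PySem.Dict.mk pm).get?
        (PySem.List.slice lower (some (i:Int)) (some ((i:Int) + ((k+1:Nat):Int)))) with _ | e
    · have h1' : ∀ pe ∈ pm, Mtch lower i pe → pe.1.length ≤ k := by
        intro pe hpe hm
        have hle := h1 pe hpe hm
        by_contra hgt
        have hEq : pe.1.length = k + 1 := by omega
        have hspan : pe.1 = PySem.List.slice lower (some (i:Int)) (some ((i:Int) + ((k+1:Nat):Int))) := by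
          rw [← hm.2, hEq]
        exact get?_mk_none hg pe hpe hspan
      have hres := ih h1' (by omega)
      show match tagA_first (PySem.Dict.mk pm) lower i (PySem.List.pyRange ((k:Nat):Int) 0 (-1)) with
        | none => pm.foldl (stepB lower i) (0, none) = (0, none)
        | some (L, e) => 1 ≤ L ∧ L ≤ ((k+1:Nat):Int) ∧
            pm.foldl (stepB lower i) (0, none) = (L.toNat, some e)
      rcases ha : tagA_first (PySem.Dict.mk pm) lower i (PySem.List.pyRange ((k:Nat):Int) 0 (-1)) with _ | ⟨L, e2⟩
      · simp only [ha] at hres ⊢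
        exact hres
      · simp only [ha] at hres ⊢
        exact ⟨hres.1, le_trans hres.2.1 (by push_cast; omega), hres.2.2⟩
    · refine ⟨by exact_mod_cast Nat.succ_pos k, le_refl _, ?_⟩
      rw [Int.toNat_natCast]
      exact foldl_stepB_hit h1 (by omega) hg (0, none) (by omega)

theorem foldl_setrun (v : String) :
    ∀ (c : Nat) (pre : List String) (m : Nat), c ≤ m →
    (PySem.List.pyRange (pre.length : Int) ((pre.length : Int) + (c : Int)) 1).foldl
        (fun t j => PySem.List.pySetD t j v) (pre ++ List.replicate m "O") =
      (pre ++ List.replicate c v) ++ List.replicate (m - c) "O" := by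
  intro c
  induction c with
  | zero => intro pre m h; rw [PySem.List.pyRange_one_eq_nil (by omega)]; simp
  | succ c ih =>
    intro pre m h
    rw [PySem.List.pyRange_one_cons (by omega)]
    simp only [List.foldl_cons]
    rw [PySem.List.pySetD_natCast]
    rw [List.set_append, if_neg (lt_irrefl _), Nat.sub_self]
    obtain ⟨m', rfl⟩ : ∃ m', m = m' + 1 := ⟨m - 1, by omega⟩
    rw [show List.replicate (m' + 1) "O" = "O" :: List.replicate m' "O" from rfl]
    simp only [List.set_cons_zero]
    have e2 : (pre.length : Int) + ((c:Nat)+1 : Nat) = (((pre ++ [v]).length : Nat) : Int) + (c : Int) := by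
      simp only [List.length_append, List.length_cons, List.length_nil]; push_cast; ring
    have e1 : (pre.length : Int) + 1 = (((pre ++ [v]).length : Nat) : Int) := by simp only [List.length_append, List.length_cons, List.length_nil]; push_cast; ring
    rw [show (pre ++ v :: List.replicate m' "O") = (pre ++ [v]) ++ List.replicate m' "O" by simp]
    rw [e2, e1, ih (pre ++ [v]) m' (by omega)]
    rw [show m' + 1 - (c + 1) = m' - c from by omega]
    simp [List.replicate_succ, List.append_assoc]

theorem mem_le_maxD {pm : List (List String × String)} {pe : List String × String}
    (h : pe ∈ pm) :
    pe.1.length ≤ PySem.List.maxD (pm.map (fun kv => kv.1.length)) (fun x => x) 1 := by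
  have hmem : pe.1.length ∈ pm.map (fun kv => kv.1.length) := List.mem_map_of_mem h
  have hne : pm.map (fun kv => kv.1.length) ≠ [] := List.ne_nil_of_mem hmem
  have hq := PySem.List.max?_eq_some_maxD (pm.map (fun kv => kv.1.length)) (fun x => x) 1 hne
  exact PySem.List.max?_isMax hq _ hmem


theorem get?_mk_some_key {pm : List (List String × String)} {p : List String} {e : String}
    (h : (PySem.Dict.mk pm).get? p = some e) : ∃ pe ∈ pm, pe.1 = p := by
  induction pm with
  | nil => exact absurd h (by simp [PySem.Dict.get?])
  | cons q rest ih =>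
    rw [show (PySem.Dict.mk (q :: rest)) = ({ items := (q.1, q.2) :: rest } : PySem.Dict (List String) String) by rfl,
      PySem.Dict.get?_mk_cons] at h
    split at h
    · rename_i hq
      exact ⟨q, List.mem_cons_self, by simpa using hq⟩
    · obtain ⟨pe, hpe, hp⟩ := ih h
      exact ⟨pe, List.mem_cons_of_mem _ hpe, hp⟩


theorem get?_mk_ne_none {pm : List (List String × String)} {pe : List String × String}
    (h : pe ∈ pm) : (PySem.Dict.mk pm).get? pe.1 ≠ none := by
  induction pm with
  | nil => simp at h
  | cons q rest ih =>
    rw [show (PySem.Dict.mk (q :: rest)) = ({ items := (q.1, q.2) :: rest } : PySem.Dict (List String) String) by rfl,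
      PySem.Dict.get?_mk_cons]
    split
    · simp
    · rename_i hq
      rcases List.mem_cons.mp h with rfl | h'
      · exact absurd (by simp) hq
      · exact ih h'


theorem pref_mono {y : List String} :
    ∀ (pm : List (List String × String)) (s : PySem.Set (List String)), y ∈ s →
    y ∈ pm.foldl (fun s pe =>
      (PySem.List.pyRange 1 (pe.1.length : Int) 1).foldl
        (fun s j => PySem.Set.add s (PySem.List.slice pe.1 none (some j))) s) s := by
  intro pm
  induction pm with
  | nil => intro s h; exact h
  | cons q rest ih =>
    intro s h
    simp only [List.foldl_cons]
    exact ih _ ((PySem.Set.mem_foldl_add _ _ _ _).mpr (Or.inl h))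

theorem pref_complete_aux {pe : List String × String} {j : Nat} (h1 : 1 ≤ j) (h2 : j < pe.1.length) :
    ∀ (pm : List (List String × String)) (s : PySem.Set (List String)), pe ∈ pm →
    pe.1.take j ∈ pm.foldl (fun s pe =>
      (PySem.List.pyRange 1 (pe.1.length : Int) 1).foldl
        (fun s j => PySem.Set.add s (PySem.List.slice pe.1 none (some j))) s) s := by
  intro pm
  induction pm with
  | nil => intro s h; simp at h
  | cons q rest ih =>
    intro s h
    simp only [List.foldl_cons]
    rcases List.mem_cons.mp h with rfl | h'
    · apply pref_mono
      apply (PySem.Set.mem_foldl_add _ _ _ _).mpr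
      right
      refine ⟨(j : Int), ?_, ?_⟩
      · rw [PySem.List.mem_pyRange_one]
        constructor <;> [omega; exact_mod_cast h2]
      · rw [PySem.List.slice_to_natCast]
    · exact ih _ h'

theorem pref_complete {pm : List (List String × String)} {pe : List String × String}
    (h : pe ∈ pm) {j : Nat} (h1 : 1 ≤ j) (h2 : j < pe.1.length) :
    pe.1.take j ∈ tagB_pref pm :=
  pref_complete_aux h1 h2 pm [] h


theorem seg_zero (lower : List String) (i : Nat) :
    PySem.List.slice lower (some (i:Int)) (some ((i:Int) + ((0:Nat):Int))) = [] := by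
  rw [show ((i:Int) + ((0:Nat):Int)) = ((i:Nat):Int) by push_cast; ring]
  simp [PySem.List.slice_natCast]


theorem seg_take {lower : List String} {i m L : Nat} (h : m ≤ L) :
    (PySem.List.slice lower (some (i:Int)) (some ((i:Int) + (L:Int)))).take m =
      PySem.List.slice lower (some (i:Int)) (some ((i:Int) + (m:Int))) := by
  rw [show ((i:Int) + (L:Int)) = (((i+L : Nat)) : Int) by push_cast; ring,
    show ((i:Int) + (m:Int)) = (((i+m : Nat)) : Int) by push_cast; ring,
    PySem.List.slice_natCast, PySem.List.slice_natCast, List.take_take]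
  congr 1
  omega


theorem seg_snoc {lower : List String} {i j : Nat} (hij : i ≤ j) (hj : j < lower.length) :
    PySem.List.slice lower (some (i:Int)) (some ((i:Int) + ((j-i:Nat):Int))) ++
        [PySem.List.pyGetD lower (j:Int) ""] =
      PySem.List.slice lower (some (i:Int)) (some ((i:Int) + ((j+1-i:Nat):Int))) := by
  rw [show ((i:Int) + ((j-i:Nat):Int)) = ((j:Nat):Int) by push_cast [hij]; ring,
    show ((i:Int) + ((j+1-i:Nat):Int)) = (((j+1:Nat)):Int) by push_cast [Nat.le_succ_of_le hij]; ring,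
    PySem.List.slice_natCast, PySem.List.slice_natCast]
  have hget : PySem.List.pyGetD lower (j : Int) "" = lower[j] := by
    simp [PySem.List.pyGetD_natCast, List.getD_eq_getElem?_getD, List.getElem?_eq_getElem hj]
  rw [hget]
  have h1 : lower[j] = (lower.drop i)[j - i]'(by simp; omega) := by
    simp [List.getElem_drop]
    congr 1
    omega
  rw [h1, show j + 1 - i = (j - i) + 1 by omega, List.take_add_one]
  rw [List.getElem?_eq_getElem (by simp; omega)]
  simp


-- walk invariant: best is the longest dict hit within the first h span lengths
def WGood (pm : List (List String × String)) (lower : List String) (i h : Nat)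
    (best : Nat × Option String) : Prop :=
  (best = (0, none) ∧ ∀ L, 1 ≤ L → L ≤ h →
      (PySem.Dict.mk pm).get? (PySem.List.slice lower (some (i:Int)) (some ((i:Int) + (L:Int)))) = none)
  ∨ (∃ L e, best = (L, some e) ∧ 1 ≤ L ∧ L ≤ h ∧
      (PySem.Dict.mk pm).get? (PySem.List.slice lower (some (i:Int)) (some ((i:Int) + (L:Int)))) = some e ∧
      ∀ L', 1 ≤ L' → L' ≤ h →
        (PySem.Dict.mk pm).get? (PySem.List.slice lower (some (i:Int)) (some ((i:Int) + (L':Int)))) ≠ none →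
        L' ≤ L)

theorem WGood_absorb {pm : List (List String × String)} {lower : List String} {i h h2 : Nat}
    {best : Nat × Option String} (hle : h ≤ h2)
    (hnone : ∀ L', h < L' → L' ≤ h2 →
      (PySem.Dict.mk pm).get? (PySem.List.slice lower (some (i:Int)) (some ((i:Int) + (L':Int)))) = none) :
    WGood pm lower i h best → WGood pm lower i h2 best := by
  rintro (⟨rfl, hall⟩ | ⟨L, e, rfl, hL1, hLh, hget, hmax⟩)
  · left
    refine ⟨rfl, fun L l1 l2 => ?_⟩
    by_cases hc : L ≤ h
    · exact hall L l1 hc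
    · exact hnone L (by omega) l2
  · right
    refine ⟨L, e, rfl, hL1, le_trans hLh hle, hget, fun L' l1 l2 hne => ?_⟩
    by_cases hc : L' ≤ h
    · exact hmax L' l1 hc hne
    · exact absurd (hnone L' (by omega) l2) hne

theorem walk_spec {pm : List (List String × String)} {lower : List String} {n i : Nat}
    (hn : lower.length = n) :
    ∀ (fuel j : Nat) (best : Nat × Option String), j ≤ n → i ≤ j → fuel = n - j →
    WGood pm lower i (j - i) best →
    WGood pm lower i (n - i)
      (tagB_walk (PySem.Dict.mk pm) (tagB_pref pm) lower n i fuel j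
        (PySem.List.slice lower (some (i:Int)) (some ((i:Int) + ((j-i:Nat):Int)))) best) := by
  intro fuel
  induction fuel with
  | zero =>
    intro j best h1 h2 hf hg
    obtain rfl : j = n := by omega
    exact hg
  | succ fuel ih =>
    intro j best h1 h2 hf hg
    have hjn : j < n := by omega
    simp only [tagB_walk]
    rw [if_pos hjn]
    rw [seg_snoc h2 (by omega)]
    have hstep : ∀ b', b' = (match (PySem.Dict.mk pm).get?
          (PySem.List.slice lower (some (i:Int)) (some ((i:Int) + ((j+1-i:Nat):Int)))) with
        | some e => (j + 1 - i, some e)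
        | none => best) → WGood pm lower i (j+1-i) b' := by
      intro b' hb'
      rcases hG : (PySem.Dict.mk pm).get?
          (PySem.List.slice lower (some (i:Int)) (some ((i:Int) + ((j+1-i:Nat):Int)))) with _ | e
      · rw [hG] at hb'
        subst hb'
        refine WGood_absorb (by omega) ?_ hg
        intro L' hlo hhi
        obtain rfl : L' = j + 1 - i := by omega
        exact hG
      · rw [hG] at hb'
        subst hb'
        right
        refine ⟨j+1-i, e, rfl, by omega, le_refl _, hG, fun L' l1 l2 _ => l2⟩
    by_cases hc : PySem.Set.contains (tagB_pref pm)
        (PySem.List.slice lower (some (i:Int)) (some ((i:Int) + ((j+1-i:Nat):Int)))) = true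
    · rw [if_pos hc]
      have := ih (j+1) _ (by omega) (by omega) (by omega) (hstep _ rfl)
      rw [show j + 1 - i = (j+1) - i by omega] at this ⊢
      exact this
    · rw [if_neg hc]
      refine WGood_absorb (by omega) ?_ (hstep _ rfl)
      intro L' hlo hhi
      rcases hG2 : (PySem.Dict.mk pm).get?
          (PySem.List.slice lower (some (i:Int)) (some ((i:Int) + (L':Int)))) with _ | e2
      · rfl
      · exfalso
        obtain ⟨pe, hpe, hkey⟩ := get?_mk_some_key hG2
        have hlen : pe.1.length = L' := by rw [hkey]; exact span_len (by omega)
        have hmem := pref_complete hpe (j := j+1-i) (by omega) (by omega)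
        have htk : pe.1.take (j+1-i) =
            PySem.List.slice lower (some (i:Int)) (some ((i:Int) + ((j+1-i:Nat):Int))) := by
          rw [hkey, seg_take (by omega)]
        rw [htk] at hmem
        exact hc ((PySem.Set.contains_iff _ _).mpr hmem)

theorem walk_eq_fold {pm : List (List String × String)} {lower : List String} {n i : Nat}
    (hn : lower.length = n) (hi : i < n) :
    tagB_walk (PySem.Dict.mk pm) (tagB_pref pm) lower n i (n - i) i [] (0, none) =
      pm.foldl (stepB lower i) (0, none) := by
  have h0 : WGood pm lower i 0 (0, none) := Or.inl ⟨rfl, fun L l1 l2 => by omega⟩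
  have hw := walk_spec (i := i) hn (n - i) i (0, none) (by omega) (le_refl i) rfl
    (by rw [show i - i = 0 by omega]; exact h0)
  rw [show i - i = 0 by omega, seg_zero] at hw
  rcases hw with ⟨heq, hnone⟩ | ⟨L, e, heq, hL1, hLn, hget, hmax⟩
  · rw [heq]
    refine (foldl_stepB_const (m := 0) ?_ _ (le_refl 0)).symm
    intro pe hpe hm
    exfalso
    have hlen1 : 1 ≤ pe.1.length := List.length_pos_of_ne_nil hm.1
    have hlen2 : i + pe.1.length ≤ n := by
      have := mtch_len_le (i := i) (by omega) hm
      omega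
    have := hnone pe.1.length hlen1 (by omega)
    rw [hm.2] at this
    exact get?_mk_ne_none hpe this
  · rw [heq]
    refine (foldl_stepB_hit ?_ (by omega) hget (0, none) (by omega)).symm
    intro pe hpe hm
    have hlen1 : 1 ≤ pe.1.length := List.length_pos_of_ne_nil hm.1
    have hlen2 : i + pe.1.length ≤ n := by
      have := mtch_len_le (i := i) (by omega) hm
      omega
    refine hmax pe.1.length hlen1 (by omega) ?_
    rw [hm.2]
    exact get?_mk_ne_none hpe

theorem loop_eq {pm : List (List String × String)} {lower : List String} {n maxLen : Nat}
    (hn : lower.length = n) (hmax : ∀ pe ∈ pm, pe.1.length ≤ maxLen) :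
    ∀ (fuel i : Nat) (done : List String), done.length = i → i ≤ n → n ≤ i + fuel →
    tagA_loop (PySem.Dict.mk pm) lower n maxLen fuel i (done ++ List.replicate (n - i) "O") =
      tagB_go (PySem.Dict.mk pm) (tagB_pref pm) lower n fuel i done := by
  intro fuel
  induction fuel with
  | zero =>
    intro i done hd h1 h2
    have h0 : n - i = 0 := by omega
    simp [tagA_loop, tagB_go, h0]
  | succ fuel ih =>
    intro i done hd h1 h2
    subst hd
    by_cases hin : done.length < n
    · have hi : done.length < lower.length := by omega
      have hcast : min ((maxLen:Nat):Int) ((n:Int) - (done.length:Int)) = ((min maxLen (n - done.length) : Nat):Int) := by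
        omega
      have hilen : done.length ≤ lower.length := by omega
      have hscan := scan_eq (pm := pm) (i := done.length) (lower := lower) (min maxLen (n - done.length))
        (fun pe hpe hm => by
          have hml := mtch_len_le hilen hm
          have hmx := hmax pe hpe
          omega) (by omega)
      simp only [tagA_loop, tagB_go]
      rw [if_pos hin, if_pos hin, hcast]
      rcases hA : tagA_first (PySem.Dict.mk pm) lower done.length
          (PySem.List.pyRange ((min maxLen (n - done.length) : Nat):Int) 0 (-1)) with _ | ⟨L, e⟩
      · simp only [hA] at hscan
        have hbest : tagB_walk (PySem.Dict.mk pm) (tagB_pref pm) lower n done.length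
            (n - done.length) done.length [] (0, none) = (0, none) := by
          rw [walk_eq_fold hn hin]; exact hscan
        simp only [hbest]
        have htags : done ++ List.replicate (n - done.length) "O" =
            (done ++ ["O"]) ++ List.replicate (n - (done.length+1)) "O" := by
          rw [show n - done.length = (n - (done.length+1)) + 1 by omega, List.replicate_succ]; simp
        rw [htags]
        exact ih (done.length+1) (done ++ ["O"]) (by simp) (by omega) (by omega)
      · simp only [hA] at hscan
        obtain ⟨hL1, hLk, hfold⟩ := hscan
        have hbest : tagB_walk (PySem.Dict.mk pm) (tagB_pref pm) lower n done.length
            (n - done.length) done.length [] (0, none) = (L.toNat, some e) := by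
          rw [walk_eq_fold hn hin]; exact hfold
        simp only [hbest]
        have hLtk : L.toNat ≤ n - done.length := by omega
        have hLt1 : 1 ≤ L.toNat := by omega
        -- A's tags after the two writes
        have htags1 : PySem.List.pySetD (done ++ List.replicate (n - done.length) "O") (done.length:Int) ("B-" ++ e) =
            (done ++ ["B-" ++ e]) ++ List.replicate (n - done.length - 1) "O" := by
          rw [PySem.List.pySetD_natCast, List.set_append, if_neg (lt_irrefl _), Nat.sub_self]
          rw [show n - done.length = (n - done.length - 1) + 1 by omega, List.replicate_succ, List.set_cons_zero]
          simp
        rw [htags1]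
        have hr1 : ((done.length:Int) + 1) = (((done ++ ["B-" ++ e]).length : Nat) : Int) := by
          simp
        have hr2 : ((done.length:Int) + L) = (((done ++ ["B-" ++ e]).length : Nat) : Int) + ((L.toNat - 1 : Nat) : Int) := by
          simp only [List.length_append, List.length_cons, List.length_nil]
          omega
        rw [hr2, hr1, foldl_setrun ("I-" ++ e) (L.toNat - 1) (done ++ ["B-" ++ e]) (n - done.length - 1) (by omega)]
        have hsh : (done ++ ["B-" ++ e]) ++ List.replicate (L.toNat - 1) ("I-" ++ e) =
            done ++ ("B-" ++ e) :: List.replicate (L.toNat - 1) ("I-" ++ e) := by simp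
        rw [show n - done.length - 1 - (L.toNat - 1) = n - (done.length + L.toNat) by omega, hsh]
        exact ih (done.length + L.toNat) (done ++ ("B-" ++ e) :: List.replicate (L.toNat - 1) ("I-" ++ e))
          (by simp; omega) (by omega) (by omega)
    · have h0 : n - done.length = 0 := by omega
      simp [tagA_loop, tagB_go, hin, h0]

-- ===== VERDICT (by name: the statement is the Claim_ definition above) =====
theorem tag_ner_bio_spec : Claim_equal_tag_ner_bio := by
  intro tokens phrase_map _
  unfold Spec_tag_ner_bio tag_ner_bio tag_ner_bio_alt
  have h := loop_eq (pm := phrase_map) (lower := tokens.map PySem.Str.lower)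
    (n := tokens.length)
    (maxLen := PySem.List.maxD (phrase_map.map (fun kv => kv.1.length)) (fun x => x) 1)
    (by simp) (fun pe hpe => mem_le_maxD hpe) tokens.length 0 [] rfl (Nat.zero_le _)
    (by omega)
  simpa using h
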